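-- pv_equiv track=rewrite | github.com/r-kapoor/extraction_network | extraction_network/main.py | _convert_to_docs_network_adj_list
-- ===== SOURCE A (Python) =====
-- def _convert_to_docs_network_adj_list(extraction_to_docid):
--     adjacency_list = dict()
--     for key, value in extraction_to_docid.items():
--         for page1 in value:
--             for page2 in value:
--                 if page1 != page2:
--                     if page1 in adjacency_list:
--                         adjacency_list[page1].add(page2)
--                     else:
--                         adjacency_list[page1] = set()
--                         adjacency_list[page1].add(page2)
--
--     return adjacency_list
-- ===== SOURCE B (Python) =====
-- def _convert_to_docs_network_adj_list(extraction_to_docid):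
--     # Inverted-index algorithm: first index each page by the extraction groups
--     # (with >= 2 distinct pages) that contain it, then build each page's
--     # neighbour set in one comprehension from its own groups.
--     groups = []   # distinct pages of each multi-page extraction, in order
--     index = {}    # page -> indices into groups; its key order fixes the output key order
--     for value in extraction_to_docid.values():
--         g = list(dict.fromkeys(value))
--         if len(g) < 2:
--             continue
--         i = len(groups)
--         for p in g:
--             index[p] = index.get(p, []) + [i]
--         groups.append(g)
--     return {p: {q for i in idxs for q in groups[i] if q != p}
--             for p, idxs in index.items()}
-- ===== Notes on version B (the rewrite author's own statement) =====
-- stated objective: alternative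
-- what changed: A's incremental dict-of-sets built by a triple nested loop over all ordered page pairs is replaced by an inverted index (page -> list of multi-page group ids) built in one pass, from which each page's neighbour set is produced in a single final comprehension over its own groups.
import Mathlib
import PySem

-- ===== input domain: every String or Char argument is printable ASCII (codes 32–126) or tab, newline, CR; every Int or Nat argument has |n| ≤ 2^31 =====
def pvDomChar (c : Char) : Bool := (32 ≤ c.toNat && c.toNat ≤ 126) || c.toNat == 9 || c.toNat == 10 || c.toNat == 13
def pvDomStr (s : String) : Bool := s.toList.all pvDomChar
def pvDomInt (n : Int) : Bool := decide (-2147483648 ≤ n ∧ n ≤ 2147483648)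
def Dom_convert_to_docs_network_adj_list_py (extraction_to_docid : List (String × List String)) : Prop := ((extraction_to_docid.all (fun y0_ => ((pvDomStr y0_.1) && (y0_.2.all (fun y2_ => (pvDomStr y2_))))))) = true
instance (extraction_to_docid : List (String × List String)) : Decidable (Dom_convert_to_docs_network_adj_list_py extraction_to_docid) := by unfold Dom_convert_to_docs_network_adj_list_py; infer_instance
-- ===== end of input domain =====

-- B replaces A's triple nested pair loop mutating a dict of sets by an inverted index
-- (page -> ids of the multi-page groups containing it) built in one pass, from which each
-- page's neighbour set is produced in one final comprehension (objective: alternative algorithm).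

-- ===== PORT A =====
def convert_to_docs_network_adj_list_py (extraction_to_docid : List (String × List String)) : List (String × List String) :=
  let adjacency_list : PySem.Dict String (PySem.Set String) :=
    (PySem.Dict.ofList extraction_to_docid).items.foldl
      (fun adj kv =>
        kv.2.foldl
          (fun adj page1 =>
            kv.2.foldl
              (fun adj page2 =>
                if page1 ≠ page2 then
                  if adj.contains page1 then
                    adj.insert page1 (PySem.Set.add (adj.getD page1 PySem.Set.empty) page2)
                  else
                    adj.insert page1 (PySem.Set.add PySem.Set.empty page2)
                else adj)
              adj)
          adj)
      PySem.Dict.empty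
  adjacency_list.items

-- ===== PORT B =====
-- groups/index phase, then a final map: transliteration of Source B
def convert_to_docs_network_adj_list_py_alt (extraction_to_docid : List (String × List String)) : List (String × List String) :=
  let st : List (List String) × PySem.Dict String (List Nat) :=
    (PySem.Dict.ofList extraction_to_docid).values.foldl
      (fun st value =>
        let g := PySem.List.dedup value
        if g.length < 2 then st
        else
          let i := st.1.length
          let index := g.foldl (fun ix p => ix.insert p (ix.getD p [] ++ [i])) st.2
          (st.1 ++ [g], index))
      ([], PySem.Dict.empty)
  st.2.items.map (fun pidxs =>
    (pidxs.1, PySem.Set.ofList (pidxs.2.flatMap (fun i => (st.1.getD i []).filter (fun q => q != pidxs.1)))))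

-- ===== PRECONDITION & SPEC =====
def Spec_convert_to_docs_network_adj_list_py (extraction_to_docid : List (String × List String)) (out : List (String × List String)) : Prop := out = convert_to_docs_network_adj_list_py_alt extraction_to_docid
instance (extraction_to_docid : List (String × List String)) (out : List (String × List String)) : Decidable (Spec_convert_to_docs_network_adj_list_py extraction_to_docid out) := by unfold Spec_convert_to_docs_network_adj_list_py; infer_instance

-- ===== CLAIM (what is proved, stated in full; the proofs are below) =====
def Claim_equal_convert_to_docs_network_adj_list_py : Prop := ∀ (extraction_to_docid : List (String × List String)), Dom_convert_to_docs_network_adj_list_py extraction_to_docid → Spec_convert_to_docs_network_adj_list_py extraction_to_docid (convert_to_docs_network_adj_list_py extraction_to_docid)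

-- ===== LEMMAS AND PROOFS =====

-- A-side reduction: the triple loop per group collapses to one pvOp pass over the distinct pages
def pvOth (w : List String) (page : String) : List String :=
  (PySem.Set.ofList w).filter (fun p => p != page)
def pvOp (w : List String) (adj : PySem.Dict String (PySem.Set String)) (page : String) :
    PySem.Dict String (PySem.Set String) :=
  if pvOth w page = [] then adj
  else adj.insert page (PySem.Set.update (adj.getD page PySem.Set.empty) (pvOth w page))
def pvDone (w : List String) (x : String) (adj : PySem.Dict String (PySem.Set String)) : Prop :=
  pvOth w x ≠ [] → adj.contains x = true ∧ ∀ y ∈ pvOth w x, y ∈ adj.getD x PySem.Set.empty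

theorem pv_insert_getD_self (d : PySem.Dict String (PySem.Set String)) (k : String)
    (hnd : d.keys.Nodup) (hc : d.contains k = true) :
    d.insert k (d.getD k PySem.Set.empty) = d := by
  apply PySem.Dict.ext
  rw [PySem.Dict.items_insert_of_contains d _ hc]
  conv_rhs => rw [← List.map_id d.items]
  refine List.map_congr_left fun p hp => ?_
  by_cases hpk : p.1 = k
  · have hp' : (p.1, p.2) ∈ d.items := by simpa using hp
    have h1 := PySem.Dict.get?_of_mem_items d hp' hnd
    have h2 : d.getD k PySem.Set.empty = p.2 := by
      rw [PySem.Dict.getD_eq_get?_getD, ← hpk, h1]; rfl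
    subst hpk
    simp only [beq_self_eq_true, if_true, h2, id_eq]
  · simp [hpk]

theorem pv_op_nodup (w : List String) (adj : PySem.Dict String (PySem.Set String)) (page : String)
    (h : adj.keys.Nodup) : (pvOp w adj page).keys.Nodup := by
  unfold pvOp
  split_ifs
  · exact h
  · exact PySem.Dict.nodup_keys_insert adj page _ h

theorem pv_op_done (w : List String) (adj : PySem.Dict String (PySem.Set String)) (x : String)
    (hnd : adj.keys.Nodup) (hd : pvDone w x adj) : pvOp w adj x = adj := by
  unfold pvOp
  by_cases h0 : pvOth w x = []
  · simp [h0]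
  · obtain ⟨hc, hsub⟩ := hd h0
    rw [if_neg h0]
    have hfil : List.filter (fun y => !(PySem.Set.contains (adj.getD x PySem.Set.empty) y))
        (PySem.Set.ofList (pvOth w x)) = [] := by
      rw [List.filter_eq_nil_iff]
      intro y hy
      have hy' : y ∈ pvOth w x := (PySem.Set.mem_ofList _ _).mp hy
      have := hsub y hy'
      simp only [Bool.not_eq_eq_eq_not, Bool.not_true, Bool.not_eq_false]
      simpa [PySem.Set.empty] using this
    have hupd : PySem.Set.update (adj.getD x PySem.Set.empty) (pvOth w x)
        = adj.getD x PySem.Set.empty := by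
      rw [PySem.Set.update_eq_append_filter, hfil, List.append_nil]
    rw [hupd, pv_insert_getD_self adj x hnd hc]

theorem pv_done_op (w : List String) (adj : PySem.Dict String (PySem.Set String)) (x y : String)
    (h : pvDone w x adj ∨ x = y) : pvDone w x (pvOp w adj y) := by
  by_cases hxy : x = y
  · subst hxy
    intro hne
    unfold pvOp
    rw [if_neg hne]
    refine ⟨PySem.Dict.contains_insert_self _ _ _, fun z hz => ?_⟩
    rw [PySem.Dict.getD_insert_self]
    exact (PySem.Set.mem_update _ _ _).mpr (Or.inr hz)
  · have hdx : pvDone w x adj := h.resolve_right hxy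
    intro hne
    obtain ⟨hc, hsub⟩ := hdx hne
    unfold pvOp
    split_ifs with h0
    · exact ⟨hc, hsub⟩
    · refine ⟨?_, fun z hz => ?_⟩
      · rw [PySem.Dict.contains_insert]
        simp [hc]
      · rw [PySem.Dict.getD_insert_of_ne _ _ _ hxy]
        exact hsub z hz

theorem pv_inner (v : List String) (page1 : String) (adj : PySem.Dict String (PySem.Set String)) :
    v.foldl
      (fun adj page2 =>
        if page1 ≠ page2 then
          if adj.contains page1 then
            adj.insert page1 (PySem.Set.add (adj.getD page1 PySem.Set.empty) page2)
          else
            adj.insert page1 (PySem.Set.add PySem.Set.empty page2)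
        else adj)
      adj
    = if v.filter (fun p => p != page1) = [] then adj
      else adj.insert page1 (PySem.Set.update (adj.getD page1 PySem.Set.empty) (v.filter (fun p => p != page1))) := by
  induction v generalizing adj with
  | nil => simp
  | cons x v ih =>
    simp only [List.foldl_cons, List.filter_cons]
    by_cases hx : x = page1
    · subst hx
      simp only [ne_eq, not_true_eq_false, if_false, bne_self_eq_false, Bool.false_eq_true]
      exact ih adj
    · have hne : page1 ≠ x := fun hh => hx hh.symm
      have hb : (x != page1) = true := by simpa using hx
      rw [if_pos hne, hb]
      have hstep : (if adj.contains page1 then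
            adj.insert page1 (PySem.Set.add (adj.getD page1 PySem.Set.empty) x)
          else adj.insert page1 (PySem.Set.add PySem.Set.empty x))
          = adj.insert page1 (PySem.Set.add (adj.getD page1 PySem.Set.empty) x) := by
        by_cases hc : adj.contains page1 = true
        · rw [if_pos hc]
        · rw [if_neg hc, PySem.Dict.getD_of_not_contains adj _ (by simpa using hc)]
      rw [hstep, ih]
      set s := adj.getD page1 PySem.Set.empty with hs
      by_cases hv : v.filter (fun p => p != page1) = []
      · rw [if_pos hv, if_neg (by simp), hv, if_pos rfl, PySem.Set.update_cons, PySem.Set.update_nil]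
      · rw [if_neg hv, if_neg (by simp), if_pos rfl, PySem.Set.update_cons]
        rw [PySem.Dict.getD_insert_self, PySem.Dict.insert_insert_self]

theorem pv_ofList_filter' (v : List String) (p : String → Bool) :
    PySem.Set.ofList (v.filter p) = (PySem.Set.ofList v).filter p := by
  induction v with
  | nil => rfl
  | cons x v ih =>
    by_cases hp : p x = true
    · simp only [List.filter_cons, hp, if_true, PySem.Set.ofList_cons, ih, PySem.Set.discard,
        List.filter_filter]
      exact congrArg (x :: ·) (List.filter_congr fun y _ => Bool.and_comm _ _)
    · simp only [List.filter_cons, hp, if_false, PySem.Set.ofList_cons, ih, PySem.Set.discard,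
        List.filter_filter, Bool.false_eq_true]
      refine List.filter_congr fun y _ => ?_
      by_cases hyx : y = x
      · cases hpy : p y <;> simp_all
      · simp [hyx]

theorem pv_filter_empty_iff (v : List String) (q : String → Bool) :
    v.filter q = [] ↔ (PySem.Set.ofList v).filter q = [] := by
  rw [← pv_ofList_filter']
  constructor
  · intro h; rw [h]; rfl
  · intro h
    rw [List.eq_nil_iff_forall_not_mem]
    intro y hy
    have : y ∈ PySem.Set.ofList (v.filter q) := (PySem.Set.mem_ofList _ _).mpr hy
    simp [h] at this

theorem pv_update_dedup (s : PySem.Set String) (v : List String) (q : String → Bool) :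
    PySem.Set.update s (v.filter q) = PySem.Set.update s ((PySem.Set.ofList v).filter q) := by
  rw [PySem.Set.update_eq_append_filter, PySem.Set.update_eq_append_filter]
  conv_rhs => rw [← pv_ofList_filter' v q, PySem.Set.ofList_ofList]

theorem pv_inner_op (v : List String) (page1 : String) (adj : PySem.Dict String (PySem.Set String)) :
    (if v.filter (fun p => p != page1) = [] then adj
     else adj.insert page1 (PySem.Set.update (adj.getD page1 PySem.Set.empty) (v.filter (fun p => p != page1))))
    = pvOp v adj page1 := by
  unfold pvOp pvOth
  by_cases h : v.filter (fun p => p != page1) = []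
  · rw [if_pos h, if_pos ((pv_filter_empty_iff v _).mp h)]
  · rw [if_neg h, if_neg (fun hh => h ((pv_filter_empty_iff v _).mpr hh)),
      pv_update_dedup]

theorem pv_dedup (w v e : List String) (adj : PySem.Dict String (PySem.Set String))
    (hnd : adj.keys.Nodup) (he : ∀ x ∈ e, pvDone w x adj) :
    v.foldl (pvOp w) adj
      = ((PySem.Set.ofList v).filter (fun x => !e.contains x)).foldl (pvOp w) adj := by
  induction v generalizing e adj with
  | nil => rfl
  | cons x v ih =>
    rw [List.foldl_cons, PySem.Set.ofList_cons, List.filter_cons]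
    by_cases hxe : x ∈ e
    · have hx1 : (!e.contains x) = false := by simp [hxe]
      rw [hx1, if_neg (by simp)]
      rw [pv_op_done w adj x hnd (he x hxe), ih e adj hnd he]
      congr 1
      simp only [PySem.Set.discard, List.filter_filter]
      refine List.filter_congr fun y _ => ?_
      by_cases hyx : y = x
      · subst hyx; simp [hxe]
      · simp [hyx]
    · have hx1 : (!e.contains x) = true := by simp [hxe]
      rw [hx1, if_pos rfl, List.foldl_cons]
      have hnd' := pv_op_nodup w adj x hnd
      have he' : ∀ z ∈ x :: e, pvDone w z (pvOp w adj x) := by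
        intro z hz
        rcases List.mem_cons.mp hz with hzx | hze
        · exact pv_done_op w adj z x (Or.inr hzx)
        · exact pv_done_op w adj z x (Or.inl (he z hze))
      rw [ih (x :: e) (pvOp w adj x) hnd' he']
      congr 1
      simp only [PySem.Set.discard, List.filter_filter]
      refine List.filter_congr fun y _ => ?_
      by_cases hyx : y = x
      · subst hyx; simp
      · simp [hyx]

theorem pv_stepA (v : List String) (adj : PySem.Dict String (PySem.Set String))
    (hnd : adj.keys.Nodup) :
    v.foldl
      (fun adj page1 =>
        v.foldl
          (fun adj page2 =>
            if page1 ≠ page2 then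
              if adj.contains page1 then
                adj.insert page1 (PySem.Set.add (adj.getD page1 PySem.Set.empty) page2)
              else
                adj.insert page1 (PySem.Set.add PySem.Set.empty page2)
            else adj)
          adj)
      adj
    = (PySem.Set.ofList v).foldl (pvOp v) adj := by
  have h1 : ∀ (a : PySem.Dict String (PySem.Set String)) (p : String),
      v.foldl
        (fun adj page2 =>
          if p ≠ page2 then
            if adj.contains p then
              adj.insert p (PySem.Set.add (adj.getD p PySem.Set.empty) page2)
            else
              adj.insert p (PySem.Set.add PySem.Set.empty page2)
          else adj)
        a = pvOp v a p := fun a p => (pv_inner v p a).trans (pv_inner_op v p a)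
  calc v.foldl _ adj = v.foldl (pvOp v) adj := by
        exact PySem.List.foldl_congr_mem v _ _ adj (fun a x _ => h1 a x)
    _ = ((PySem.Set.ofList v).filter (fun x => !([] : List String).contains x)).foldl (pvOp v) adj :=
        pv_dedup v v [] adj hnd (by simp)
    _ = (PySem.Set.ofList v).foldl (pvOp v) adj := by
        congr 1
        simp

theorem pv_fold_nodup (w l : List String) (adj : PySem.Dict String (PySem.Set String))
    (hnd : adj.keys.Nodup) : (l.foldl (pvOp w) adj).keys.Nodup := by
  induction l generalizing adj with
  | nil => exact hnd
  | cons x l ih => exact ih _ (pv_op_nodup w adj x hnd)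

-- the group-level step both sides reduce to
def pvGStep (g : List String) (adj : PySem.Dict String (PySem.Set String)) :
    PySem.Dict String (PySem.Set String) :=
  g.foldl
    (fun adj p =>
      adj.insert p (PySem.Set.update (adj.getD p PySem.Set.empty) (g.filter (fun q => q != p))))
    adj

theorem pv_stepB (v : List String) (adj : PySem.Dict String (PySem.Set String)) :
    (PySem.Set.ofList v).foldl (pvOp v) adj
    = if (PySem.Set.ofList v).length < 2 then adj else pvGStep (PySem.Set.ofList v) adj := by
  by_cases hlen : (PySem.Set.ofList v).length < 2
  · rw [if_pos hlen]
    rcases hg : PySem.Set.ofList v with _ | ⟨a, _ | ⟨b, t⟩⟩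
    · rfl
    · rw [List.foldl_cons, List.foldl_nil]
      have : pvOth v a = [] := by
        unfold pvOth
        rw [hg]
        simp
      unfold pvOp
      rw [if_pos this]
    · exfalso
      rw [hg] at hlen
      simp at hlen
  · rw [if_neg hlen]
    unfold pvGStep
    refine PySem.List.foldl_congr_mem _ _ _ adj (fun a page hpage => ?_)
    have hnd2 := PySem.Set.nodup_ofList (α := String) (xs := v)
    have hoth : pvOth v page ≠ [] := by
      intro hnil
      have hall := List.filter_eq_nil_iff.mp hnil
      rcases hg : PySem.Set.ofList v with _ | ⟨x, _ | ⟨y, t⟩⟩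
      · rw [hg] at hlen; simp at hlen
      · rw [hg] at hlen; simp at hlen
      · have hx : x = page := by
          have := hall x (by rw [hg]; exact List.mem_cons_self)
          simpa using this
        have hy : y = page := by
          have := hall y (by rw [hg]; exact List.mem_cons_of_mem _ List.mem_cons_self)
          simpa using this
        rw [hg] at hnd2
        have : x ≠ y := by
          have := List.nodup_cons.mp hnd2
          intro hxy
          exact this.1 (hxy ▸ List.mem_cons_self)
        exact this (hx.trans hy.symm)
    show pvOp v a page = _
    unfold pvOp
    rw [if_neg hoth]
    rfl

-- the multi-page groups (distinct pages) of a list of values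
def pvMs (vs : List (List String)) : List (List String) :=
  (vs.map PySem.Set.ofList).filter (fun g => decide (2 ≤ g.length))

theorem pv_mainA (l : List (List String)) (adj : PySem.Dict String (PySem.Set String))
    (hnd : adj.keys.Nodup) :
    l.foldl
      (fun adj v =>
        v.foldl
          (fun adj page1 =>
            v.foldl
              (fun adj page2 =>
                if page1 ≠ page2 then
                  if adj.contains page1 then
                    adj.insert page1 (PySem.Set.add (adj.getD page1 PySem.Set.empty) page2)
                  else
                    adj.insert page1 (PySem.Set.add PySem.Set.empty page2)
                else adj)
              adj)
          adj)
      adj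
    = (pvMs l).foldl (fun adj g => pvGStep g adj) adj := by
  induction l generalizing adj with
  | nil => rfl
  | cons v l ih =>
    rw [List.foldl_cons]
    have hstep := (pv_stepA v adj hnd).trans (pv_stepB v adj)
    have hnd' : ((v.foldl
        (fun adj page1 =>
          v.foldl
            (fun adj page2 =>
              if page1 ≠ page2 then
                if adj.contains page1 then
                  adj.insert page1 (PySem.Set.add (adj.getD page1 PySem.Set.empty) page2)
                else
                  adj.insert page1 (PySem.Set.add PySem.Set.empty page2)
              else adj)
            adj)
        adj)).keys.Nodup := by
      rw [pv_stepA v adj hnd]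
      exact pv_fold_nodup v _ adj hnd
    rw [ih _ hnd', hstep]
    unfold pvMs
    rw [List.map_cons, List.filter_cons]
    by_cases hlen : (PySem.Set.ofList v).length < 2
    · rw [if_pos hlen, if_neg (by simpa using (by omega : ¬ 2 ≤ (PySem.Set.ofList v).length))]
    · rw [if_neg hlen, if_pos (by simpa using (by omega : 2 ≤ (PySem.Set.ofList v).length)),
        List.foldl_cons]

-- B-side machinery: the inverted index over a group list, and the value each page gets
def pvIdxStep (n : Nat) (ix : PySem.Dict String (List Nat)) (g : List String) :
    PySem.Dict String (List Nat) :=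
  g.foldl (fun ix p => ix.insert p (ix.getD p [] ++ [n])) ix

def pvIndex (ms : List (List String)) : PySem.Dict String (List Nat) :=
  ms.zipIdx.foldl (fun ix gn => pvIdxStep gn.2 ix gn.1) PySem.Dict.empty

def pvVal (ms : List (List String)) (p : String) (ix : List Nat) : PySem.Set String :=
  PySem.Set.ofList (ix.flatMap (fun i => (ms.getD i []).filter (fun q => q != p)))

def pvMapVal (ms : List (List String)) (l : List (String × List Nat)) :
    List (String × PySem.Set String) :=
  l.map (fun pr => (pr.1, pvVal ms pr.1 pr.2))

theorem pvIndex_append (ms : List (List String)) (g : List String) :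
    pvIndex (ms ++ [g]) = pvIdxStep ms.length (pvIndex ms) g := by
  unfold pvIndex
  rw [show (ms ++ [g]).zipIdx = ms.zipIdx ++ [(g, ms.length)] by simp [List.zipIdx_append],
    List.foldl_append]
  rfl

theorem pvVal_snoc (ms : List (List String)) (g : List String) (p : String) (ix : List Nat) :
    pvVal (ms ++ [g]) p (ix ++ [ms.length])
      = PySem.Set.update (pvVal (ms ++ [g]) p ix) (g.filter (fun q => q != p)) := by
  unfold pvVal
  rw [List.flatMap_append, PySem.Set.ofList_append]
  congr 1
  simp [List.getD]

theorem pvVal_of_bound (ms : List (List String)) (g : List String) (p : String) (ix : List Nat)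
    (hb : ∀ i ∈ ix, i < ms.length) : pvVal ms p ix = pvVal (ms ++ [g]) p ix := by
  unfold pvVal
  congr 1
  refine List.flatMap_congr (fun i hi => ?_)
  rw [show (ms ++ [g]).getD i [] = ms.getD i [] by
    simp [List.getD, List.getElem?_append_left (hb i hi)]]

def pvBound (ix : PySem.Dict String (List Nat)) (n : Nat) : Prop :=
  ∀ pr ∈ ix.items, ∀ i ∈ pr.2, i < n

theorem pv_getD_bound (d : PySem.Dict String (List Nat)) (n : Nat) (p : String)
    (hb : pvBound d n) : ∀ i ∈ d.getD p [], i < n := by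
  intro i hi
  rw [PySem.Dict.getD_eq_get?_getD] at hi
  cases hq : d.get? p with
  | none => rw [hq] at hi; simp at hi
  | some a =>
    rw [hq] at hi
    exact hb (p, a) (PySem.Dict.mem_items_of_get?_eq_some d hq) i hi

theorem pv_bound_insert (d : PySem.Dict String (List Nat)) (n : Nat) (p : String)
    (hb : pvBound d (n + 1)) :
    pvBound (d.insert p (d.getD p [] ++ [n])) (n + 1) := by
  intro pr hpr i hi
  rcases (PySem.Dict.mem_items_insert _ _ _ _).mp hpr with h | ⟨h, _⟩
  · subst h
    rcases List.mem_append.mp hi with h' | h'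
    · exact pv_getD_bound d (n + 1) p hb i h'
    · simp at h'; omega
  · exact hb pr h i hi

theorem pv_bound_idxStep (ix : PySem.Dict String (List Nat)) (n : Nat) (g : List String)
    (hb : pvBound ix n) : pvBound (pvIdxStep n ix g) (n + 1) := by
  unfold pvIdxStep
  have hb1 : pvBound ix (n + 1) := fun pr hpr i hi => Nat.lt_succ_of_lt (hb pr hpr i hi)
  clear hb
  induction g generalizing ix with
  | nil => exact hb1
  | cons x g ih =>
    rw [List.foldl_cons]
    exact ih _ (pv_bound_insert ix n x hb1)

theorem pv_bound_index (ms : List (List String)) : pvBound (pvIndex ms) ms.length := by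
  induction ms using List.reverseRecOn with
  | nil =>
    intro pr hpr
    have : pr ∈ ([] : List (String × List Nat)) := hpr
    simp at this
  | append_singleton ms g ih =>
    rw [pvIndex_append]
    simpa using pv_bound_idxStep (pvIndex ms) ms.length g ih

theorem pv_nodup_index (ms : List (List String)) : (pvIndex ms).keys.Nodup := by
  induction ms using List.reverseRecOn with
  | nil => exact PySem.Dict.nodup_keys_empty
  | append_singleton ms g ih =>
    rw [pvIndex_append]
    unfold pvIdxStep
    exact PySem.Dict.nodup_keys_foldl_insert g _ (pvIndex ms) ih

theorem pv_keys_mapVal (ms : List (List String)) (l : List (String × List Nat)) :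
    (PySem.Dict.mk (pvMapVal ms l)).keys = l.map (·.1) := by
  show (pvMapVal ms l).map (·.1) = l.map (·.1)
  unfold pvMapVal
  rw [List.map_map]
  rfl

theorem pv_getD_mapVal (ms : List (List String)) (I : PySem.Dict String (List Nat)) (p : String)
    (hnd : I.keys.Nodup) :
    (PySem.Dict.mk (pvMapVal ms I.items)).getD p PySem.Set.empty = pvVal ms p (I.getD p []) := by
  cases hq : I.get? p with
  | none =>
    have hc : I.contains p = false := by
      rw [PySem.Dict.contains_eq_isSome_get?, hq]; rfl
    have hc' : (PySem.Dict.mk (pvMapVal ms I.items)).contains p = false := by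
      have hk : p ∉ (PySem.Dict.mk (pvMapVal ms I.items)).keys := by
        rw [pv_keys_mapVal]
        intro hmem
        have : I.contains p = true := by
          rw [PySem.Dict.contains_iff_mem_keys]
          exact hmem
        rw [hc] at this; exact Bool.false_ne_true this
      cases hcc : (PySem.Dict.mk (pvMapVal ms I.items)).contains p with
      | false => rfl
      | true => exact absurd ((PySem.Dict.contains_iff_mem_keys _ _).mp hcc) hk
    rw [PySem.Dict.getD_of_not_contains _ _ hc',
      PySem.Dict.getD_eq_get?_getD, hq]
    rfl
  | some a =>
    have hmem : (p, a) ∈ I.items := PySem.Dict.mem_items_of_get?_eq_some I hq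
    have hmem' : (p, pvVal ms p a) ∈ (PySem.Dict.mk (pvMapVal ms I.items)).items := by
      show (p, pvVal ms p a) ∈ pvMapVal ms I.items
      unfold pvMapVal
      exact List.mem_map.mpr ⟨(p, a), hmem, rfl⟩
    have hnd' : (PySem.Dict.mk (pvMapVal ms I.items)).keys.Nodup := by
      rw [pv_keys_mapVal]
      exact hnd
    rw [PySem.Dict.getD_of_mem_items _ hmem' hnd', PySem.Dict.getD_eq_get?_getD, hq]
    rfl

theorem pv_insert_mapVal (ms : List (List String)) (I : PySem.Dict String (List Nat))
    (p : String) (ixv : List Nat) :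
    (PySem.Dict.mk (pvMapVal ms I.items)).insert p (pvVal ms p ixv)
      = PySem.Dict.mk (pvMapVal ms (I.insert p ixv).items) := by
  apply PySem.Dict.ext
  have hc : (PySem.Dict.mk (pvMapVal ms I.items)).contains p = I.contains p := by
    rw [PySem.Dict.contains_eq_decide_mem_keys, PySem.Dict.contains_eq_decide_mem_keys,
      pv_keys_mapVal]
    rfl
  by_cases hcp : I.contains p = true
  · rw [PySem.Dict.items_insert_of_contains _ _ (hc.trans hcp)]
    show _ = pvMapVal ms (I.insert p ixv).items
    rw [PySem.Dict.items_insert_of_contains _ _ hcp]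
    show (pvMapVal ms I.items).map _ = pvMapVal ms (I.items.map _)
    unfold pvMapVal
    rw [List.map_map, List.map_map]
    refine List.map_congr_left fun pr _ => ?_
    by_cases hpk : (pr.1 == p) = true
    · simp [Function.comp, hpk]
    · simp [Function.comp, hpk]
  · have hcp' : I.contains p = false := by simpa using hcp
    rw [PySem.Dict.items_insert_of_not_contains _ _ (hc.trans hcp')]
    show _ = pvMapVal ms (I.insert p ixv).items
    rw [PySem.Dict.items_insert_of_not_contains _ _ hcp']
    unfold pvMapVal
    rw [List.map_append]
    rfl

theorem pv_inner_fold (ms' : List (List String)) (g pages : List String) (n : Nat)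
    (I : PySem.Dict String (List Nat)) (hnd : I.keys.Nodup)
    (hval : ∀ (p : String) (ix : List Nat),
      pvVal ms' p (ix ++ [n]) = PySem.Set.update (pvVal ms' p ix) (g.filter (fun q => q != p))) :
    pages.foldl
      (fun adj p =>
        adj.insert p (PySem.Set.update (adj.getD p PySem.Set.empty) (g.filter (fun q => q != p))))
      (PySem.Dict.mk (pvMapVal ms' I.items))
    = PySem.Dict.mk (pvMapVal ms' (pages.foldl (fun ix p => ix.insert p (ix.getD p [] ++ [n])) I).items) := by
  induction pages generalizing I with
  | nil => rfl
  | cons x pages ih =>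
    rw [List.foldl_cons, List.foldl_cons]
    rw [pv_getD_mapVal ms' I x hnd, ← hval x (I.getD x []), pv_insert_mapVal]
    exact ih _ (PySem.Dict.nodup_keys_insert I x _ hnd)

theorem pv_fold_gstep (ms : List (List String)) :
    ms.foldl (fun adj g => pvGStep g adj) PySem.Dict.empty = PySem.Dict.mk (pvMapVal ms (pvIndex ms).items) := by
  induction ms using List.reverseRecOn with
  | nil => rfl
  | append_singleton ms g ih =>
    rw [List.foldl_append, List.foldl_cons, List.foldl_nil, ih]
    have hrw : pvMapVal ms (pvIndex ms).items = pvMapVal (ms ++ [g]) (pvIndex ms).items := by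
      unfold pvMapVal
      refine List.map_congr_left fun pr hpr => ?_
      rw [pvVal_of_bound ms g pr.1 pr.2 (fun i hi => pv_bound_index ms pr hpr i hi)]
    rw [hrw]
    unfold pvGStep
    rw [pv_inner_fold (ms ++ [g]) g g ms.length (pvIndex ms) (pv_nodup_index ms)
      (fun p ix => pvVal_snoc ms g p ix)]
    rw [pvIndex_append]
    rfl

theorem pv_state (vs : List (List String)) :
    vs.foldl
      (fun (st : List (List String) × PySem.Dict String (List Nat)) value =>
        let g := PySem.List.dedup value
        if g.length < 2 then st
        else
          let i := st.1.length
          let index := g.foldl (fun ix p => ix.insert p (ix.getD p [] ++ [i])) st.2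
          (st.1 ++ [g], index))
      ([], PySem.Dict.empty)
    = (pvMs vs, pvIndex (pvMs vs)) := by
  induction vs using List.reverseRecOn with
  | nil => rfl
  | append_singleton vs v ih =>
    rw [List.foldl_append, List.foldl_cons, List.foldl_nil, ih]
    show (if (PySem.List.dedup v).length < 2 then _ else _) = _
    have hd : PySem.List.dedup v = PySem.Set.ofList v := rfl
    by_cases hlen : (PySem.Set.ofList v).length < 2
    · rw [if_pos (by rw [hd]; exact hlen)]
      have : pvMs (vs ++ [v]) = pvMs vs := by
        unfold pvMs
        rw [List.map_append, List.filter_append]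
        simp only [List.map_cons, List.map_nil, List.filter_cons, List.filter_nil]
        rw [if_neg (by simpa using (by omega : ¬ 2 ≤ (PySem.Set.ofList v).length))]
        simp
      rw [this]
    · rw [if_neg (by rw [hd]; exact hlen)]
      have hms : pvMs (vs ++ [v]) = pvMs vs ++ [PySem.Set.ofList v] := by
        unfold pvMs
        rw [List.map_append, List.filter_append]
        simp only [List.map_cons, List.map_nil, List.filter_cons, List.filter_nil]
        rw [if_pos (by simpa using (by omega : 2 ≤ (PySem.Set.ofList v).length))]
      rw [hms, pvIndex_append, hd]
      rfl

theorem pv_mainA' (l : List (String × List String)) :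
    l.foldl
      (fun adj kv =>
        kv.2.foldl
          (fun adj page1 =>
            kv.2.foldl
              (fun adj page2 =>
                if page1 ≠ page2 then
                  if adj.contains page1 then
                    adj.insert page1 (PySem.Set.add (adj.getD page1 PySem.Set.empty) page2)
                  else
                    adj.insert page1 (PySem.Set.add PySem.Set.empty page2)
                else adj)
              adj)
          adj)
      PySem.Dict.empty
    = (pvMs (l.map (·.2))).foldl (fun adj g => pvGStep g adj) PySem.Dict.empty := by
  have h := pv_mainA (l.map (·.2)) PySem.Dict.empty PySem.Dict.nodup_keys_empty
  rw [List.foldl_map] at h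
  exact h

theorem pv_state' (l : List (String × List String)) :
    l.foldl
      (fun (st : List (List String) × PySem.Dict String (List Nat)) kv =>
        let g := PySem.List.dedup kv.2
        if g.length < 2 then st
        else
          let i := st.1.length
          let index := g.foldl (fun ix p => ix.insert p (ix.getD p [] ++ [i])) st.2
          (st.1 ++ [g], index))
      ([], PySem.Dict.empty)
    = (pvMs (l.map (·.2)), pvIndex (pvMs (l.map (·.2)))) := by
  have h := pv_state (l.map (·.2))
  rw [List.foldl_map] at h
  exact h

-- ===== VERDICT (by name: the statement is the Claim_ definition above) =====
theorem convert_to_docs_network_adj_list_py_spec : Claim_equal_convert_to_docs_network_adj_list_py := by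
  intro etd _hdom
  unfold Spec_convert_to_docs_network_adj_list_py
  unfold convert_to_docs_network_adj_list_py convert_to_docs_network_adj_list_py_alt
  show (List.foldl _ PySem.Dict.empty (PySem.Dict.ofList etd).items).items = _
  rw [pv_mainA' (PySem.Dict.ofList etd).items, pv_fold_gstep,
    show (PySem.Dict.ofList etd).values = (PySem.Dict.ofList etd).items.map (·.2) from rfl,
    List.foldl_map, pv_state' (PySem.Dict.ofList etd).items]
  rfl
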